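-- pv_equiv track=rewrite | github.com/naisachetti/INE5421-GIRLS | regex_lib.py | protege_literais
-- ===== SOURCE A (Python) =====
-- def protege_literais(regex):
--     inc_i = 0 # Para fazer a protecao em apenas uma passada pela string
--     new_regex = regex
--     for i in range (len(regex)):
--         if new_regex[i+inc_i] == '\\':
--             new_regex = new_regex[0:i+inc_i] + '(' + new_regex[i+inc_i:i+inc_i+2] + ')' + new_regex[i+inc_i+2:len(new_regex)]
--             inc_i += 2
--
--     return new_regex
-- ===== SOURCE B (Python) =====
-- def protege_literais(regex):
--     out = []
--     it = iter(regex)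
--     for c in it:
--         if c == '\\':
--             out.append('(' + c + next(it, '') + ')')
--         else:
--             out.append(c)
--     return ''.join(out)
-- ===== Notes on version B (the rewrite author's own statement) =====
-- stated objective: alternative
-- what changed: Replaces A's in-place splicing (rebuilding the whole string with slices at every backslash while tracking an index offset) by a single forward pass over an iterator that emits output pieces and consumes the char after each backslash, joined once at the end.
import Mathlib
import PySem

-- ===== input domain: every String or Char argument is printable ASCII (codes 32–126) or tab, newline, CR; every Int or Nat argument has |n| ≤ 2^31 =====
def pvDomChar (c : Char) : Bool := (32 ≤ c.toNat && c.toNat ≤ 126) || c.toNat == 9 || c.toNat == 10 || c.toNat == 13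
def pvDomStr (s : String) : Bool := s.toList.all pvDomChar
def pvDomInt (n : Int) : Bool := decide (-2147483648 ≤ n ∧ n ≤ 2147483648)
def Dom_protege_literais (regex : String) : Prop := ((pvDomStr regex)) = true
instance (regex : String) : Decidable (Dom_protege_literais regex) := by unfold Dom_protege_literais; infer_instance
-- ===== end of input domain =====

-- B replaces A's index-juggling in-place string splicing by a single forward pass that
-- emits output pieces, consuming the character after each backslash (objective: alternative,
-- a single pass with no slicing).

-- ===== PORT A =====
-- Loop body of A's 'for i in range(len(regex))'; the state is (inc_i, new_regex).
-- new_regex[i+inc_i] is ported with pyGet?; its 'none' (IndexError) branch is unreachable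
-- (A never indexes out of range), so it leaves the state unchanged.
def stepA (st : Int × List Char) (i : Int) : Int × List Char :=
  match PySem.List.pyGet? st.2 (i + st.1) with
  | none => st
  | some c =>
    if c = '\\' then
      (st.1 + 2,
        PySem.List.slice st.2 (some 0) (some (i + st.1)) ++
        '(' :: (PySem.List.slice st.2 (some (i + st.1)) (some (i + st.1 + 2)) ++
        ')' :: PySem.List.slice st.2 (some (i + st.1 + 2)) (some (st.2.length : Int))))
    else st

def protege_literais (regex : String) : String :=
  let r := regex.toList
  String.ofList (((PySem.List.pyRange 0 (r.length : Int) 1).foldl stepA (0, r)).2)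

-- ===== PORT B =====
-- B's 'for c in it' loop with 'next(it, "")' consuming the escaped char, as structural recursion.
def altGo : List Char → List Char
  | [] => []
  | '\\' :: [] => ['(', '\\', ')']
  | '\\' :: d :: rest => '(' :: '\\' :: d :: ')' :: altGo rest
  | c :: rest => c :: altGo rest


def protege_literais_alt (regex : String) : String :=
  String.ofList (altGo regex.toList)

-- ===== PRECONDITION & SPEC =====
def Spec_protege_literais (regex : String) (out : String) : Prop := out = protege_literais_alt regex
instance (regex : String) (out : String) : Decidable (Spec_protege_literais regex out) := by unfold Spec_protege_literais; infer_instance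

-- ===== CLAIM (what is proved, stated in full; the proofs are below) =====
def Claim_equal_protege_literais : Prop := ∀ (regex : String), Dom_protege_literais regex → Spec_protege_literais regex (protege_literais regex)

-- ===== LEMMAS AND PROOFS =====

theorem altGo_cons_ne (c : Char) (rest : List Char) (hc : c ≠ '\\') :
    altGo (c :: rest) = c :: altGo rest := by
  cases rest with
  | nil => simp [altGo, hc]
  | cons d r => simp [altGo, hc]

theorem stepA_wrap (O R : List Char) (i inc : Int) (hO : (O.length : Int) = i + inc)
    (hR : R.head? = some '\\') :
    stepA (inc, O ++ R) i = (inc + 2, O ++ '(' :: (R.take 2 ++ ')' :: R.drop 2)) := by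
  have hg : PySem.List.pyGet? (O ++ R) (i + inc) = some '\\' := by
    rw [← hO, PySem.List.pyGet?_natCast]
    cases R with
    | nil => simp at hR
    | cons a t => simp at hR; simp [hR]
  simp only [stepA, hg]
  rw [show (i + inc : Int) = ((O.length : Nat) : Int) from hO.symm]
  rw [show ((O.length : Nat) : Int) + 2 = ((O.length + 2 : Nat) : Int) by push_cast; ring]
  rw [PySem.List.slice_zero_start, PySem.List.slice_to_natCast,
      PySem.List.slice_natCast, PySem.List.slice_natCast]
  rw [if_pos trivial]
  have e1 : O.length + 2 - O.length = 2 := by omega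
  have e2 : (O ++ R).drop (O.length + 2) = R.drop 2 := by
    rw [← List.drop_drop, List.drop_left]
  have e3 : (O ++ R).length - (O.length + 2) = R.length - 2 := by simp; omega
  rw [List.take_left, List.drop_left, e1, e2, e3]
  have e4 : R.length - 2 = (R.drop 2).length := by simp
  rw [e4, List.take_length]

theorem loopA_eq (R : List Char) : ∀ (O : List Char) (i inc : Int), 0 ≤ i → 0 ≤ inc →
    (O.length : Int) = i + inc →
    ((PySem.List.pyRange i (i + R.length) 1).foldl stepA (inc, O ++ R)).2 = O ++ altGo R := by
  induction R using altGo.induct with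
  | case1 =>
      intro O i inc hi hinc hO
      rw [PySem.List.pyRange_one_eq_nil (by simp)]
      simp [altGo]
  | case2 =>
      intro O i inc hi hinc hO
      rw [show i + ((['\\'] : List Char).length : Int) = i + 1 by simp]
      rw [PySem.List.pyRange_one_cons (by omega), PySem.List.pyRange_one_eq_nil (by omega)]
      simp only [List.foldl_cons, List.foldl_nil]
      rw [stepA_wrap O ['\\'] i inc hO rfl]
      simp [altGo]
  | case3 d rest ih =>
      intro O i inc hi hinc hO
      rw [show i + (('\\' :: d :: rest).length : Int) = (i + 2) + (rest.length : Int) by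
        push_cast [List.length_cons]; ring]
      rw [PySem.List.pyRange_one_cons (by omega), PySem.List.pyRange_one_cons (by omega)]
      simp only [List.foldl_cons]
      rw [stepA_wrap O ('\\' :: d :: rest) i inc hO rfl]
      rw [show O ++ '(' :: (('\\' :: d :: rest).take 2 ++ ')' :: ('\\' :: d :: rest).drop 2)
          = (O ++ ['(', '\\', d]) ++ ')' :: rest by simp]
      have hg2 : PySem.List.pyGet? ((O ++ ['(', '\\', d]) ++ ')' :: rest)
          ((i + 1) + (inc + 2)) = some ')' := by
        rw [show (i + 1) + (inc + 2) = (((O ++ ['(', '\\', d]).length : Nat) : Int) by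
          simp; omega]
        rw [PySem.List.pyGet?_natCast]
        simp
      have hstep2 : stepA (inc + 2, (O ++ ['(', '\\', d]) ++ ')' :: rest) (i + 1)
          = (inc + 2, (O ++ ['(', '\\', d]) ++ ')' :: rest) := by
        simp only [stepA, hg2]
        rw [if_neg (by decide)]
      rw [hstep2]
      rw [show (O ++ ['(', '\\', d]) ++ ')' :: rest = (O ++ ['(', '\\', d, ')']) ++ rest by simp]
      rw [show i + 1 + 1 = i + 2 by ring]
      rw [ih (O ++ ['(', '\\', d, ')']) (i + 2) (inc + 2) (by omega) (by omega)
          (by simp; omega)]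
      simp [altGo]
  | case4 c rest h1 h2 ih =>
      intro O i inc hi hinc hO
      have hc : c ≠ '\\' := by
        intro h
        cases rest with
        | nil => exact h1 h rfl
        | cons d r => exact h2 d r h rfl
      rw [show i + ((c :: rest).length : Int) = (i + 1) + (rest.length : Int) by
        push_cast [List.length_cons]; ring]
      rw [PySem.List.pyRange_one_cons (by omega)]
      simp only [List.foldl_cons]
      have hg : PySem.List.pyGet? (O ++ c :: rest) (i + inc) = some c := by
        rw [← hO, PySem.List.pyGet?_natCast]; simp
      have hstep : stepA (inc, O ++ c :: rest) i = (inc, O ++ c :: rest) := by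
        simp only [stepA, hg]
        rw [if_neg hc]
      rw [hstep]
      rw [show O ++ c :: rest = (O ++ [c]) ++ rest by simp]
      rw [ih (O ++ [c]) (i + 1) inc (by omega) hinc (by simp; omega)]
      rw [altGo_cons_ne c rest hc]
      simp

-- ===== VERDICT (by name: the statement is the Claim_ definition above) =====
theorem protege_literais_spec : Claim_equal_protege_literais := by
  intro regex _
  unfold Spec_protege_literais protege_literais protege_literais_alt
  have h := loopA_eq regex.toList [] 0 0 le_rfl le_rfl (by simp)
  simp only [List.nil_append] at h
  simp only [zero_add] at h ⊢
  rw [h]
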